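-- pv_equiv track=rewrite | github.com/KUSH42/hermes-agent | hermes_cli/tui/widgets.py | _build_hints
-- ===== SOURCE A (Python) =====
-- _SEP = "  [dim]·[/dim]  "
--
-- def _build_hints(phase: str, key_color: str) -> dict[str, str]:
--     """Build {long, medium, short, minimal} hint variants for a phase+color."""
--     k = key_color
--
--     def _fmt(entries: list[tuple[str, str | None]], sep: str = _SEP) -> str:
--         parts = []
--         for key, desc in entries:
--             if desc is not None:
--                 parts.append(f"[bold {k}]{key}[/] [dim]{desc}[/dim]")
--             else:
--                 parts.append(f"[bold {k}]{key}[/]")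
--         return sep.join(parts)
--
--     if phase == "idle":
--         long_ = _fmt([("F1", "help"), ("^F", "search"), ("/", "cmd"), ("@", "path")])
--         medium = long_
--         short = _fmt([("F1", None), ("^F", None), ("/", None), ("@", None)])
--         minimal = f"[bold {k}]F1[/]"
--     elif phase == "typing":
--         long_ = _fmt([("↵", "send"), ("Esc", "clear"), ("@", "path"), ("/", "cmd")])
--         medium = long_
--         short = _fmt([("↵", None), ("Esc", None), ("@", None), ("/", None)])
--         minimal = f"[bold {k}]↵[/]"
--     elif phase in ("stream", "file"):
--         s = f"[bold {k}]^C[/] [dim]interrupt[/dim]{_SEP}[bold {k}]Esc[/] [dim]dismiss[/dim]"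
--         long_ = s
--         medium = s
--         short = f"[bold {k}]^C[/]{_SEP}[bold {k}]Esc[/]"
--         minimal = f"[bold {k}]^C[/]"
--     elif phase == "browse":
--         long_ = _fmt([("⇥", "next"), ("c", "copy"), ("a", "expand"), ("A", "collapse"), ("Esc", "exit")])
--         medium = long_
--         short = _fmt([("⇥", None), ("c", None), ("a", None), ("A", None), ("Esc", None)])
--         minimal = f"[bold {k}]⇥[/]"
--     elif phase == "overlay":
--         long_ = _fmt([("↑↓", "navigate"), ("↵", "confirm"), ("Esc", "close")])
--         medium = long_
--         short = _fmt([("↑↓", None), ("↵", None), ("Esc", None)])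
--         minimal = f"[bold {k}]↵[/]"
--     elif phase == "voice":
--         long_ = _fmt([("␣", "stop"), ("Esc", "cancel")])
--         medium = long_
--         short = _fmt([("␣", None), ("Esc", None)])
--         minimal = f"[bold {k}]␣[/]"
--     elif phase == "error":
--         long_ = _fmt([("^Z", "undo"), ("^C", "new prompt"), ("F1", "help")])
--         medium = long_
--         short = _fmt([("^Z", None), ("^C", None), ("F1", None)])
--         minimal = f"[bold {k}]^Z[/]"
--     else:
--         # Fallback: idle
--         long_ = _fmt([("F1", "help"), ("^F", "search")])
--         medium = long_
--         short = f"[bold {k}]F1[/]"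
--         minimal = f"[bold {k}]F1[/]"
--
--     return {"long": long_, "medium": medium, "short": short, "minimal": minimal}
-- ===== SOURCE B (Python) =====
-- _SEP = "  [dim]·[/dim]  "
--
-- # phase -> ((key, desc) entries, minimal key); "stream" and "file" share one list
-- _TABLE = {
--     "idle": ([("F1", "help"), ("^F", "search"), ("/", "cmd"), ("@", "path")], "F1"),
--     "typing": ([("↵", "send"), ("Esc", "clear"), ("@", "path"), ("/", "cmd")], "↵"),
--     "stream": ([("^C", "interrupt"), ("Esc", "dismiss")], "^C"),
--     "file": ([("^C", "interrupt"), ("Esc", "dismiss")], "^C"),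
--     "browse": ([("⇥", "next"), ("c", "copy"), ("a", "expand"), ("A", "collapse"), ("Esc", "exit")], "⇥"),
--     "overlay": ([("↑↓", "navigate"), ("↵", "confirm"), ("Esc", "close")], "↵"),
--     "voice": ([("␣", "stop"), ("Esc", "cancel")], "␣"),
--     "error": ([("^Z", "undo"), ("^C", "new prompt"), ("F1", "help")], "^Z"),
-- }
--
--
-- def _build_hints(phase: str, key_color: str) -> dict:
--     """Single accumulator pass: build long and short together from one entry table."""
--     known = phase in _TABLE
--     entries, mkey = _TABLE[phase] if known else ([("F1", "help"), ("^F", "search")], "F1")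
--     long_ = short = ""
--     first = True
--     for key, desc in entries:
--         sep = "" if first else _SEP
--         first = False
--         tag = f"[bold {key_color}]{key}[/]"
--         long_ += sep + tag + f" [dim]{desc}[/dim]"
--         short += sep + tag
--     minimal = f"[bold {key_color}]{mkey}[/]"
--     if not known:
--         # unknown phase: A's fallback shows only the first key even in short
--         short = minimal
--     return {"long": long_, "medium": long_, "short": short, "minimal": minimal}
-- ===== Notes on version B (the rewrite author's own statement) =====
-- stated objective: simpler
-- what changed: Replaces A's eight-way if/elif chain with per-variant _fmt list-build-and-join passes by one phase->(entries, minimal-key) table and a single accumulator loop that concatenates the long and short strings together in one pass (minimal computed directly; only the unknown-phase fallback special-cases short).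
import Mathlib
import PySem

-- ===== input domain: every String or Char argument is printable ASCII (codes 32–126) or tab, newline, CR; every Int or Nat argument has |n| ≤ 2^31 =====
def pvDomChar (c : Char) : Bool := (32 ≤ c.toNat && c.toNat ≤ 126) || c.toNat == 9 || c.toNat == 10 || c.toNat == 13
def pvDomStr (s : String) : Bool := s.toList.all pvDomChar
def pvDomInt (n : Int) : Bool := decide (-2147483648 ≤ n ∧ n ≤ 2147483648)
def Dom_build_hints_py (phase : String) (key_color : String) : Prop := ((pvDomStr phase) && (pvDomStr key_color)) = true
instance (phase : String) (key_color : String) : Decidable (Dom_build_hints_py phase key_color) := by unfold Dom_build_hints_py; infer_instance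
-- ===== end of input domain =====

-- B replaces A's if/elif chain of per-variant _fmt join passes by one phase->entries table and a
-- single accumulator loop building long and short together (objective: simpler).


-- ===== PORT A =====
def pvSep : String := "  [dim]·[/dim]  "

-- A's nested _fmt: a loop appending a formatted part per entry, then sep.join
def pvFmtA (k : String) (entries : List (String × Option String)) (sep : String) : String :=
  PySem.Str.join sep
    (entries.foldl (fun parts e =>
      match e with
      | (key, some desc) =>
          parts ++ ["[bold " ++ k ++ "]" ++ key ++ "[/] [dim]" ++ desc ++ "[/dim]"]
      | (key, none) =>
          parts ++ ["[bold " ++ k ++ "]" ++ key ++ "[/]"]) [])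

def build_hints_py (phase : String) (key_color : String) : List (String × String) :=
  let k := key_color
  if phase = "idle" then
    let long_ := pvFmtA k [("F1", some "help"), ("^F", some "search"), ("/", some "cmd"), ("@", some "path")] pvSep
    let medium := long_
    let short := pvFmtA k [("F1", none), ("^F", none), ("/", none), ("@", none)] pvSep
    let minimal := "[bold " ++ k ++ "]F1[/]"
    [("long", long_), ("medium", medium), ("short", short), ("minimal", minimal)]
  else if phase = "typing" then
    let long_ := pvFmtA k [("↵", some "send"), ("Esc", some "clear"), ("@", some "path"), ("/", some "cmd")] pvSep
    let medium := long_
    let short := pvFmtA k [("↵", none), ("Esc", none), ("@", none), ("/", none)] pvSep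
    let minimal := "[bold " ++ k ++ "]↵[/]"
    [("long", long_), ("medium", medium), ("short", short), ("minimal", minimal)]
  else if phase = "stream" ∨ phase = "file" then
    let s := "[bold " ++ k ++ "]^C[/] [dim]interrupt[/dim]" ++ pvSep ++ "[bold " ++ k ++ "]Esc[/] [dim]dismiss[/dim]"
    let long_ := s
    let medium := s
    let short := "[bold " ++ k ++ "]^C[/]" ++ pvSep ++ "[bold " ++ k ++ "]Esc[/]"
    let minimal := "[bold " ++ k ++ "]^C[/]"
    [("long", long_), ("medium", medium), ("short", short), ("minimal", minimal)]
  else if phase = "browse" then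
    let long_ := pvFmtA k [("⇥", some "next"), ("c", some "copy"), ("a", some "expand"), ("A", some "collapse"), ("Esc", some "exit")] pvSep
    let medium := long_
    let short := pvFmtA k [("⇥", none), ("c", none), ("a", none), ("A", none), ("Esc", none)] pvSep
    let minimal := "[bold " ++ k ++ "]⇥[/]"
    [("long", long_), ("medium", medium), ("short", short), ("minimal", minimal)]
  else if phase = "overlay" then
    let long_ := pvFmtA k [("↑↓", some "navigate"), ("↵", some "confirm"), ("Esc", some "close")] pvSep
    let medium := long_
    let short := pvFmtA k [("↑↓", none), ("↵", none), ("Esc", none)] pvSep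
    let minimal := "[bold " ++ k ++ "]↵[/]"
    [("long", long_), ("medium", medium), ("short", short), ("minimal", minimal)]
  else if phase = "voice" then
    let long_ := pvFmtA k [("␣", some "stop"), ("Esc", some "cancel")] pvSep
    let medium := long_
    let short := pvFmtA k [("␣", none), ("Esc", none)] pvSep
    let minimal := "[bold " ++ k ++ "]␣[/]"
    [("long", long_), ("medium", medium), ("short", short), ("minimal", minimal)]
  else if phase = "error" then
    let long_ := pvFmtA k [("^Z", some "undo"), ("^C", some "new prompt"), ("F1", some "help")] pvSep
    let medium := long_
    let short := pvFmtA k [("^Z", none), ("^C", none), ("F1", none)] pvSep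
    let minimal := "[bold " ++ k ++ "]^Z[/]"
    [("long", long_), ("medium", medium), ("short", short), ("minimal", minimal)]
  else
    let long_ := pvFmtA k [("F1", some "help"), ("^F", some "search")] pvSep
    let medium := long_
    let short := "[bold " ++ k ++ "]F1[/]"
    let minimal := "[bold " ++ k ++ "]F1[/]"
    [("long", long_), ("medium", medium), ("short", short), ("minimal", minimal)]

-- ===== PORT B =====
-- phase -> ((key, desc) entries, minimal key); "stream" and "file" share one list
def pvTable : PySem.Dict String (List (String × String) × String) :=
  PySem.Dict.ofList
    [ ("idle", ([("F1", "help"), ("^F", "search"), ("/", "cmd"), ("@", "path")], "F1")),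
      ("typing", ([("↵", "send"), ("Esc", "clear"), ("@", "path"), ("/", "cmd")], "↵")),
      ("stream", ([("^C", "interrupt"), ("Esc", "dismiss")], "^C")),
      ("file", ([("^C", "interrupt"), ("Esc", "dismiss")], "^C")),
      ("browse", ([("⇥", "next"), ("c", "copy"), ("a", "expand"), ("A", "collapse"), ("Esc", "exit")], "⇥")),
      ("overlay", ([("↑↓", "navigate"), ("↵", "confirm"), ("Esc", "close")], "↵")),
      ("voice", ([("␣", "stop"), ("Esc", "cancel")], "␣")),
      ("error", ([("^Z", "undo"), ("^C", "new prompt"), ("F1", "help")], "^Z")) ]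

-- one loop step: state (long_, short, first), concatenating both variants at once
def pvStep (k : String) (st : String × String × Bool) (e : String × String) : String × String × Bool :=
  let sep := if st.2.2 then "" else pvSep
  let tag := "[bold " ++ k ++ "]" ++ e.1 ++ "[/]"
  (st.1 ++ sep ++ tag ++ " [dim]" ++ e.2 ++ "[/dim]", st.2.1 ++ sep ++ tag, false)

def build_hints_py_alt (phase : String) (key_color : String) : List (String × String) :=
  let hit := PySem.Dict.get? pvTable phase
  let em := hit.getD ([("F1", "help"), ("^F", "search")], "F1")
  let st := em.1.foldl (pvStep key_color) ("", "", true)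
  let minimal := "[bold " ++ key_color ++ "]" ++ em.2 ++ "[/]"
  let short := if hit.isSome then st.2.1 else minimal
  [("long", st.1), ("medium", st.1), ("short", short), ("minimal", minimal)]

-- ===== PRECONDITION & SPEC =====
def Spec_build_hints_py (phase : String) (key_color : String) (out : List (String × String)) : Prop := out = build_hints_py_alt phase key_color
instance (phase : String) (key_color : String) (out : List (String × String)) : Decidable (Spec_build_hints_py phase key_color out) := by unfold Spec_build_hints_py; infer_instance

-- ===== CLAIM (what is proved, stated in full; the proofs are below) =====
def Claim_equal_build_hints_py : Prop := ∀ (phase : String) (key_color : String), Dom_build_hints_py phase key_color → Spec_build_hints_py phase key_color (build_hints_py phase key_color)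

-- ===== LEMMAS AND PROOFS =====
theorem pv_lookup_idle : PySem.Dict.get? pvTable "idle" = some ([("F1", "help"), ("^F", "search"), ("/", "cmd"), ("@", "path")], "F1") := rfl
theorem pv_lookup_typing : PySem.Dict.get? pvTable "typing" = some ([("↵", "send"), ("Esc", "clear"), ("@", "path"), ("/", "cmd")], "↵") := rfl
theorem pv_lookup_stream : PySem.Dict.get? pvTable "stream" = some ([("^C", "interrupt"), ("Esc", "dismiss")], "^C") := rfl
theorem pv_lookup_file : PySem.Dict.get? pvTable "file" = some ([("^C", "interrupt"), ("Esc", "dismiss")], "^C") := rfl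
theorem pv_lookup_browse : PySem.Dict.get? pvTable "browse" = some ([("⇥", "next"), ("c", "copy"), ("a", "expand"), ("A", "collapse"), ("Esc", "exit")], "⇥") := rfl
theorem pv_lookup_overlay : PySem.Dict.get? pvTable "overlay" = some ([("↑↓", "navigate"), ("↵", "confirm"), ("Esc", "close")], "↵") := rfl
theorem pv_lookup_voice : PySem.Dict.get? pvTable "voice" = some ([("␣", "stop"), ("Esc", "cancel")], "␣") := rfl
theorem pv_lookup_error : PySem.Dict.get? pvTable "error" = some ([("^Z", "undo"), ("^C", "new prompt"), ("F1", "help")], "^Z") := rfl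

theorem pv_lookup_none (phase : String) (h1 : phase ≠ "idle") (h2 : phase ≠ "typing")
    (h3 : phase ≠ "stream") (h4 : phase ≠ "file") (h5 : phase ≠ "browse") (h6 : phase ≠ "overlay")
    (h7 : phase ≠ "voice") (h8 : phase ≠ "error") : PySem.Dict.get? pvTable phase = none := by
  have h : pvTable = PySem.Dict.mk
      [ ("idle", ([("F1", "help"), ("^F", "search"), ("/", "cmd"), ("@", "path")], "F1")),
        ("typing", ([("↵", "send"), ("Esc", "clear"), ("@", "path"), ("/", "cmd")], "↵")),
        ("stream", ([("^C", "interrupt"), ("Esc", "dismiss")], "^C")),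
        ("file", ([("^C", "interrupt"), ("Esc", "dismiss")], "^C")),
        ("browse", ([("⇥", "next"), ("c", "copy"), ("a", "expand"), ("A", "collapse"), ("Esc", "exit")], "⇥")),
        ("overlay", ([("↑↓", "navigate"), ("↵", "confirm"), ("Esc", "close")], "↵")),
        ("voice", ([("␣", "stop"), ("Esc", "cancel")], "␣")),
        ("error", ([("^Z", "undo"), ("^C", "new prompt"), ("F1", "help")], "^Z")) ] := rfl
  rw [h]
  simp [PySem.Dict.get?, beq_iff_eq,
    Ne.symm h1, Ne.symm h2, Ne.symm h3, Ne.symm h4, Ne.symm h5, Ne.symm h6, Ne.symm h7, Ne.symm h8]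

-- ===== VERDICT (by name: the statement is the Claim_ definition above) =====
set_option maxRecDepth 8000 in
theorem build_hints_py_spec : Claim_equal_build_hints_py := by
  intro phase k _
  unfold Spec_build_hints_py
  by_cases h1 : phase = "idle"
  · subst h1
    simp only [build_hints_py, build_hints_py_alt]
    rw [pv_lookup_idle]
    simp [pvStep, pvFmtA,
      ← String.toList_inj, String.toList_append, PySem.Str.join, PySem.Chars.join, List.intercalate, pvSep]
  by_cases h2 : phase = "typing"
  · subst h2
    simp only [build_hints_py, build_hints_py_alt]
    rw [pv_lookup_typing]
    simp [h1, pvStep, pvFmtA,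
      ← String.toList_inj, String.toList_append, PySem.Str.join, PySem.Chars.join, List.intercalate, pvSep]
  by_cases h3 : phase = "stream"
  · subst h3
    simp only [build_hints_py, build_hints_py_alt]
    rw [pv_lookup_stream]
    simp [h1, h2, pvStep, pvFmtA,
      ← String.toList_inj, String.toList_append, PySem.Str.join, PySem.Chars.join, List.intercalate, pvSep]
  by_cases h4 : phase = "file"
  · subst h4
    simp only [build_hints_py, build_hints_py_alt]
    rw [pv_lookup_file]
    simp [h1, h2, h3, pvStep, pvFmtA,
      ← String.toList_inj, String.toList_append, PySem.Str.join, PySem.Chars.join, List.intercalate, pvSep]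
  by_cases h5 : phase = "browse"
  · subst h5
    simp only [build_hints_py, build_hints_py_alt]
    rw [pv_lookup_browse]
    simp [h1, h2, h3, h4, pvStep, pvFmtA,
      ← String.toList_inj, String.toList_append, PySem.Str.join, PySem.Chars.join, List.intercalate, pvSep]
  by_cases h6 : phase = "overlay"
  · subst h6
    simp only [build_hints_py, build_hints_py_alt]
    rw [pv_lookup_overlay]
    simp [h1, h2, h3, h4, h5, pvStep, pvFmtA,
      ← String.toList_inj, String.toList_append, PySem.Str.join, PySem.Chars.join, List.intercalate, pvSep]
  by_cases h7 : phase = "voice"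
  · subst h7
    simp only [build_hints_py, build_hints_py_alt]
    rw [pv_lookup_voice]
    simp [h1, h2, h3, h4, h5, h6, pvStep, pvFmtA,
      ← String.toList_inj, String.toList_append, PySem.Str.join, PySem.Chars.join, List.intercalate, pvSep]
  by_cases h8 : phase = "error"
  · subst h8
    simp only [build_hints_py, build_hints_py_alt]
    rw [pv_lookup_error]
    simp [h1, h2, h3, h4, h5, h6, h7, pvStep, pvFmtA,
      ← String.toList_inj, String.toList_append, PySem.Str.join, PySem.Chars.join, List.intercalate, pvSep]
  · simp only [build_hints_py, build_hints_py_alt]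
    rw [pv_lookup_none phase h1 h2 h3 h4 h5 h6 h7 h8]
    simp [h1, h2, h3, h4, h5, h6, h7, h8, pvFmtA, pvStep,
      ← String.toList_inj, String.toList_append, PySem.Str.join, PySem.Chars.join, List.intercalate, pvSep]
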